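-- pv_equiv track=rewrite | github.com/Kiminni/Algorithm | 프로그래머스/unrated/120834. 외계행성의 나이/외계행성의 나이.py | solution
-- ===== SOURCE A (Python) =====
-- def solution(age):
--
--     alpha=['a','b','c','d','e','f','g','h','i','j']
--
--     i = age
--     tmp = ''
--     while i > 0:
--         tmp += alpha[i % 10]
--         i = i // 10
--
--     return tmp[::-1]
-- ===== SOURCE B (Python) =====
-- def solution(age):
--     if age <= 0:
--         return ''
--     return ''.join(chr(ord('a') + ord(d) - ord('0')) for d in str(age))
-- ===== Notes on version B (the rewrite author's own statement) =====
-- stated objective: idiomatic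
-- what changed: B maps str(age) left-to-right to letters via character arithmetic instead of extracting digits with %/// into a reversed accumulator and reversing at the end.
import Mathlib
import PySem

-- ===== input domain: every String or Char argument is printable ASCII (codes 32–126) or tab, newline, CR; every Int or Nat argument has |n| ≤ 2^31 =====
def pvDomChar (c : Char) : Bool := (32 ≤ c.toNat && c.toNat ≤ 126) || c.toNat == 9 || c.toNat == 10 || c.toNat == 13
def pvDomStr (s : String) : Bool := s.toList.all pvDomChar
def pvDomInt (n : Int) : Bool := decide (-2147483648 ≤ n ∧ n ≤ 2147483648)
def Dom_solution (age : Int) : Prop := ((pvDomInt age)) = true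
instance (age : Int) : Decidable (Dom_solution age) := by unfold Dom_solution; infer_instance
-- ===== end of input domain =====

-- B maps str(age) left-to-right to letters via character arithmetic, instead of A's
-- %/ // digit-extraction loop into a reversed accumulator followed by a reversal; same cost.


-- ===== PORT A =====
def alphaA : List Char := ['a','b','c','d','e','f','g','h','i','j']

-- the 'while i > 0' loop; alpha[i % 10] is always in range (0 ≤ i%10 < 10), ported with pyGetD
def solLoopA (i : Int) (tmp : List Char) : List Char :=
  if 0 < i then
    solLoopA (PySem.Int.floordiv i 10)
      (tmp ++ [PySem.List.pyGetD alphaA (PySem.Int.mod i 10) ' '])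
  else tmp
termination_by i.toNat
decreasing_by
  all_goals
    rw [PySem.Int.floordiv_eq_ediv_of_pos (show (0:Int) < 10 by norm_num)]
    omega

-- tmp[::-1] is List.reverse (PySem.Str.slice?_none_none_neg_one)
def solution (age : Int) : String :=
  String.ofList ((solLoopA age []).reverse)

-- ===== PORT B =====
-- chr(ord('a') + ord(d) - ord('0'))
def letterOfB (d : Char) : Char := Char.ofNat ('a'.toNat + d.toNat - '0'.toNat)

def solution_alt (age : Int) : String :=
  if age ≤ 0 then ""
  else String.ofList ((PySem.Int.toChars age).map letterOfB)

-- ===== PRECONDITION & SPEC =====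
def Spec_solution (age : Int) (out : String) : Prop := out = solution_alt age
instance (age : Int) (out : String) : Decidable (Spec_solution age out) := by unfold Spec_solution; infer_instance

-- ===== CLAIM (what is proved, stated in full; the proofs are below) =====
def Claim_equal_solution : Prop := ∀ (age : Int), Dom_solution age → Spec_solution age (solution age)

-- ===== LEMMAS AND PROOFS =====

-- digits of n, least significant first, as characters
def revDigits (n : Nat) : List Char :=
  if n = 0 then [] else Nat.digitChar (n % 10) :: revDigits (n / 10)
decreasing_by exact Nat.div_lt_self (by omega) (by norm_num)

lemma alpha_eq : ∀ d : Nat, d < 10 →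
    PySem.List.pyGetD alphaA (d : Int) ' ' = letterOfB (Nat.digitChar d) := by decide

lemma solLoopA_append (i : Int) (tmp : List Char) :
    solLoopA i tmp = tmp ++ solLoopA i [] := by
  by_cases h : 0 < i
  · rw [solLoopA, if_pos h]
    conv_rhs => rw [solLoopA, if_pos h]
    rw [solLoopA_append (PySem.Int.floordiv i 10) (tmp ++ _),
      solLoopA_append (PySem.Int.floordiv i 10) ([] ++ _)]
    simp
  · rw [solLoopA, if_neg h, solLoopA, if_neg h]; simp
termination_by i.toNat
decreasing_by
  all_goals
    rw [PySem.Int.floordiv_eq_ediv_of_pos (show (0:Int) < 10 by norm_num)]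
    omega

lemma solLoopA_eq (n : Nat) : solLoopA (n : Int) [] = (revDigits n).map letterOfB := by
  induction n using Nat.strong_induction_on with
  | _ n ih =>
    by_cases h0 : n = 0
    · subst h0; rw [solLoopA, revDigits]; simp
    · have hfd : PySem.Int.floordiv (n : Int) 10 = ((n / 10 : Nat) : Int) := by
        exact_mod_cast PySem.Int.floordiv_natCast n 10
      have hmd : PySem.Int.mod (n : Int) 10 = ((n % 10 : Nat) : Int) := by
        exact_mod_cast PySem.Int.mod_natCast n 10
      rw [solLoopA, if_pos (by exact_mod_cast Nat.pos_of_ne_zero h0),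
        revDigits, if_neg h0, hfd, hmd,
        alpha_eq _ (Nat.mod_lt n (by norm_num)),
        solLoopA_append, ih (n / 10) (Nat.div_lt_self (Nat.pos_of_ne_zero h0) (by norm_num))]
      simp

lemma toDigitsCore_eq : ∀ (f n : Nat), 0 < n → n < f → ∀ l,
    Nat.toDigitsCore 10 f n l = (revDigits n).reverse ++ l := by
  intro f
  induction f with
  | zero => omega
  | succ f ih =>
      intro n hn hf l
      rw [Nat.toDigitsCore]
      by_cases h : n / 10 = 0
      · rw [if_pos h, revDigits, if_neg (by omega), revDigits, if_pos h]
        simp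
      · conv_rhs => rw [revDigits, if_neg (show ¬ n = 0 by omega)]
        rw [if_neg h, ih (n / 10) (Nat.pos_of_ne_zero h)
          (by have := Nat.div_lt_self hn (show 1 < 10 by norm_num); omega)]
        simp

lemma toDigits_eq (n : Nat) (hn : 0 < n) :
    Nat.toDigits 10 n = (revDigits n).reverse := by
  rw [Nat.toDigits, toDigitsCore_eq (n + 1) n hn (by omega)]
  simp

-- ===== VERDICT (by name: the statement is the Claim_ definition above) =====
theorem solution_spec : Claim_equal_solution := by
  intro age _
  unfold Spec_solution solution solution_alt
  by_cases h : age ≤ 0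
  · rw [if_pos h, solLoopA, if_neg (by omega)]
    rfl
  · rw [if_neg h]
    have hage : age = ((age.toNat : Nat) : Int) := by omega
    rw [hage, solLoopA_eq, PySem.Int.toChars,
      if_neg (by omega), Int.toNat_natCast,
      toDigits_eq age.toNat (by omega)]
    simp [List.map_reverse]
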